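-- pv_equiv track=rewrite | github.com/TGT2025/bet | fx_config.py | is_trading_hours
-- ===== SOURCE A (Python) =====
-- FOREX_SESSIONS = {
--     "SYDNEY": {
--         "start_hour": 21,
--         "end_hour": 6,
--         "description": "Sydney Session",
--         "active_pairs": ["AUD_USD", "NZD_USD", "AUD_JPY"]
--     },
--     "TOKYO": {
--         "start_hour": 0,
--         "end_hour": 9,
--         "description": "Tokyo/Asian Session",
--         "active_pairs": ["USD_JPY", "EUR_JPY", "GBP_JPY", "AUD_JPY"]
--     },
--     "LONDON": {
--         "start_hour": 8,
--         "end_hour": 17,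
--         "description": "London/European Session",
--         "active_pairs": ["EUR_USD", "GBP_USD", "EUR_GBP", "EUR_JPY", "GBP_JPY"]
--     },
--     "NEW_YORK": {
--         "start_hour": 13,
--         "end_hour": 22,
--         "description": "New York/US Session",
--         "active_pairs": ["EUR_USD", "GBP_USD", "USD_CAD", "USD_JPY"]
--     }
-- }
--
-- def is_trading_hours(current_hour_utc: int, session: str = None) -> bool:
--     """Check if current time is within trading session"""
--     if session:
--         session_info = FOREX_SESSIONS.get(session)
--         if not session_info:
--             return False
--         start = session_info["start_hour"]
--         end = session_info["end_hour"]
--     else: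
--         # Check if within any major session
--         for sess_info in FOREX_SESSIONS.values():
--             start = sess_info["start_hour"]
--             end = sess_info["end_hour"]
--             if start < end:
--                 if start <= current_hour_utc < end:
--                     return True
--             else:  # Crosses midnight
--                 if current_hour_utc >= start or current_hour_utc < end:
--                     return True
--         return False
--
--     # Handle session crossing midnight
--     if start < end:
--         return start <= current_hour_utc < end
--     else:
--         return current_hour_utc >= start or current_hour_utc < end
-- ===== SOURCE B (Python) =====
-- FOREX_SESSIONS = {
--     "SYDNEY": {
--         "start_hour": 21,
--         "end_hour": 6,
--         "description": "Sydney Session",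
--         "active_pairs": ["AUD_USD", "NZD_USD", "AUD_JPY"]
--     },
--     "TOKYO": {
--         "start_hour": 0,
--         "end_hour": 9,
--         "description": "Tokyo/Asian Session",
--         "active_pairs": ["USD_JPY", "EUR_JPY", "GBP_JPY", "AUD_JPY"]
--     },
--     "LONDON": {
--         "start_hour": 8,
--         "end_hour": 17,
--         "description": "London/European Session",
--         "active_pairs": ["EUR_USD", "GBP_USD", "EUR_GBP", "EUR_JPY", "GBP_JPY"]
--     },
--     "NEW_YORK": {
--         "start_hour": 13,
--         "end_hour": 22,
--         "description": "New York/US Session",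
--         "active_pairs": ["EUR_USD", "GBP_USD", "USD_CAD", "USD_JPY"]
--     }
-- }
--
--
-- def _intervals(start, end):
--     """Decompose a session into non-wrapping half-open intervals.
--
--     A normal session is one interval [start, end); a midnight-crossing
--     session splits into the two rays [start, None) and [None, end)
--     (None = unbounded).  After this, no wrap logic is needed at lookup time.
--     """
--     if start < end:
--         return [(start, end)]
--     return [(start, None), (None, end)]
--
--
-- # Precomputed once at import: session name -> list of plain intervals.
-- SESSION_INTERVALS = {
--     name: _intervals(info["start_hour"], info["end_hour"])
--     for name, info in FOREX_SESSIONS.items()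
-- }
--
--
-- def _covered(hour, intervals):
--     """Plain containment in a list of half-open intervals with open ends."""
--     return any((lo is None or hour >= lo) and (hi is None or hour < hi)
--                for lo, hi in intervals)
--
--
-- def is_trading_hours(current_hour_utc: int, session: str = None) -> bool:
--     """Check if current time is within trading session"""
--     if session:
--         intervals = SESSION_INTERVALS.get(session)
--         return intervals is not None and _covered(current_hour_utc, intervals)
--     return any(_covered(current_hour_utc, ivs)
--                for ivs in SESSION_INTERVALS.values())
-- ===== Notes on version B (the rewrite author's own statement) =====
-- stated objective: alternative
-- what changed: Instead of branching on start<end at lookup time (A does this twice, in the named-session tail and inside the scan with early returns), B precomputes a table mapping each session to non-wrapping half-open intervals with optional bounds (a midnight-crossing session becomes two rays), so the runtime check is a single uniform interval-containment scan with no wrap logic.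
import Mathlib
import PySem

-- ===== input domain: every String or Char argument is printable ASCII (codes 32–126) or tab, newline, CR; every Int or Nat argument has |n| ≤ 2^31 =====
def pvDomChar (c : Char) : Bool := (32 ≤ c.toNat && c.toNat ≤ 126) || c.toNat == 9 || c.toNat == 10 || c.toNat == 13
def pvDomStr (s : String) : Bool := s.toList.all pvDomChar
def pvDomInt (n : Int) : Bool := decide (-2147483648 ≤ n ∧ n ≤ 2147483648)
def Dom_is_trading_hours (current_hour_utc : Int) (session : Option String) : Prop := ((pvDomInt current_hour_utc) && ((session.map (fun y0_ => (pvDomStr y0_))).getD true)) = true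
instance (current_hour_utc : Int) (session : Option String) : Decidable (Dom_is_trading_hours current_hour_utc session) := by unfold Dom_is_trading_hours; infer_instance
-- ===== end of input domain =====

-- B precomputes each session as non-wrapping half-open intervals with optional bounds
-- (a midnight-crossing session becomes two rays), so lookup is one uniform containment
-- scan with no wrap branching (objective: alternative, same cost).

-- ===== PORT A =====
-- FOREX_SESSIONS reduced to the fields the function reads: name ↦ (start_hour, end_hour)
def forexSessions : PySem.Dict String (Int × Int) :=
  PySem.Dict.ofList [("SYDNEY", (21, 6)), ("TOKYO", (0, 9)), ("LONDON", (8, 17)), ("NEW_YORK", (13, 22))]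

-- the for-loop over FOREX_SESSIONS.values() with its early `return True`s
def scanSessions (current_hour_utc : Int) : List (String × (Int × Int)) → Bool
  | [] => false
  | (_, (start, «end»)) :: rest =>
    if start < «end» then
      if start ≤ current_hour_utc ∧ current_hour_utc < «end» then true
      else scanSessions current_hour_utc rest
    else
      if current_hour_utc ≥ start ∨ current_hour_utc < «end» then true
      else scanSessions current_hour_utc rest

def is_trading_hours (current_hour_utc : Int) (session : Option String) : Bool :=
  match session with
  | some s =>
    if s ≠ "" then
      match PySem.Dict.get? forexSessions s with
      | none => false
      | some (start, «end») =>
        if start < «end» then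
          decide (start ≤ current_hour_utc ∧ current_hour_utc < «end»)
        else
          decide (current_hour_utc ≥ start ∨ current_hour_utc < «end»)
    else scanSessions current_hour_utc forexSessions.items
  | none => scanSessions current_hour_utc forexSessions.items

-- ===== PORT B =====
-- _intervals: decompose a session into non-wrapping half-open intervals (none = unbounded)
def intervalsOf (start «end» : Int) : List (Option Int × Option Int) :=
  if start < «end» then [(some start, some «end»)] else [(some start, none), (none, some «end»)]

-- SESSION_INTERVALS, built once from FOREX_SESSIONS
def sessionIntervals : PySem.Dict String (List (Option Int × Option Int)) :=
  PySem.Dict.ofList (forexSessions.items.map (fun p => (p.1, intervalsOf p.2.1 p.2.2)))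

-- _covered: plain containment in a list of half-open intervals with open ends
def covered (hour : Int) (intervals : List (Option Int × Option Int)) : Bool :=
  intervals.any (fun p =>
    (match p.1 with | none => true | some lo => decide (hour ≥ lo)) &&
    (match p.2 with | none => true | some hi => decide (hour < hi)))

def is_trading_hours_alt (current_hour_utc : Int) (session : Option String) : Bool :=
  match session with
  | some s =>
    if s ≠ "" then
      match PySem.Dict.get? sessionIntervals s with
      | none => false
      | some ivs => covered current_hour_utc ivs
    else sessionIntervals.values.any (fun ivs => covered current_hour_utc ivs)
  | none => sessionIntervals.values.any (fun ivs => covered current_hour_utc ivs)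

-- ===== PRECONDITION & SPEC =====
def Spec_is_trading_hours (current_hour_utc : Int) (session : Option String) (out : Bool) : Prop := out = is_trading_hours_alt current_hour_utc session
instance (current_hour_utc : Int) (session : Option String) (out : Bool) : Decidable (Spec_is_trading_hours current_hour_utc session out) := by unfold Spec_is_trading_hours; infer_instance

-- ===== CLAIM (what is proved, stated in full; the proofs are below) =====
def Claim_equal_is_trading_hours : Prop := ∀ (current_hour_utc : Int) (session : Option String), Dom_is_trading_hours current_hour_utc session → Spec_is_trading_hours current_hour_utc session (is_trading_hours current_hour_utc session)

-- ===== LEMMAS AND PROOFS =====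

-- A's two-branch wrap test equals containment in the decomposed intervals.
theorem branch_eq (h start «end» : Int) :
    (if start < «end» then decide (start ≤ h ∧ h < «end»)
     else decide (h ≥ start ∨ h < «end»)) = covered h (intervalsOf start «end») := by
  by_cases h1 : start < «end» <;>
    simp [covered, intervalsOf, h1, ge_iff_le]

-- A's scan loop with early returns equals B's any over the decomposed intervals.
theorem scan_eq_any (h : Int) (l : List (String × (Int × Int))) :
    scanSessions h l = (l.map (fun p => intervalsOf p.2.1 p.2.2)).any (covered h) := by
  induction l with
  | nil => rfl
  | cons p rest ih =>
    obtain ⟨_, start, en⟩ := p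
    have hb := branch_eq h start en
    simp only [scanSessions, List.map_cons, List.any_cons]
    by_cases h1 : start < en <;>
      simp only [h1, if_pos, if_neg, not_false_iff] at hb ⊢ <;>
      split_ifs with hc <;> simp_all

-- B's precomputed table: values in the order of FOREX_SESSIONS, lookups transported.
theorem values_eq :
    sessionIntervals.values = forexSessions.items.map (fun p => intervalsOf p.2.1 p.2.2) := by
  decide

theorem get?_eq (s : String) :
    PySem.Dict.get? sessionIntervals s =
      (PySem.Dict.get? forexSessions s).map (fun p => intervalsOf p.1 p.2) := by
  by_cases h1 : "SYDNEY" = s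
  · subst h1; decide
  by_cases h2 : "TOKYO" = s
  · subst h2; decide
  by_cases h3 : "LONDON" = s
  · subst h3; decide
  by_cases h4 : "NEW_YORK" = s
  · subst h4; decide
  have e1 : sessionIntervals.items =
      [("SYDNEY", [(some 21, none), (none, some 6)]), ("TOKYO", [(some 0, some 9)]),
       ("LONDON", [(some 8, some 17)]), ("NEW_YORK", [(some 13, some 22)])] := by decide
  have e2 : forexSessions.items =
      [("SYDNEY", ((21 : Int), (6 : Int))), ("TOKYO", (0, 9)), ("LONDON", (8, 17)),
       ("NEW_YORK", (13, 22))] := by decide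
  have b1 : ("SYDNEY" == s) = false := by simpa using h1
  have b2 : ("TOKYO" == s) = false := by simpa using h2
  have b3 : ("LONDON" == s) = false := by simpa using h3
  have b4 : ("NEW_YORK" == s) = false := by simpa using h4
  simp [PySem.Dict.get?, e1, e2, List.find?, b1, b2, b3, b4]

-- ===== VERDICT (by name: the statement is the Claim_ definition above) =====
theorem is_trading_hours_spec : Claim_equal_is_trading_hours := by
  intro h session _
  unfold Spec_is_trading_hours is_trading_hours is_trading_hours_alt
  match session with
  | none =>
    dsimp only
    rw [values_eq, List.any_map]
    exact scan_eq_any h _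
  | some s =>
    dsimp only
    by_cases hs : s ≠ ""
    · rw [if_pos hs, if_pos hs, get?_eq]
      match hget : PySem.Dict.get? forexSessions s with
      | none => rfl
      | some (start, en) => exact branch_eq h start en
    · rw [if_neg hs, if_neg hs, values_eq, List.any_map]
      exact scan_eq_any h _
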